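-- pv_equiv track=rewrite | github.com/TJ-5/GEMA | processing.py | parse_track_filename
-- ===== SOURCE A (Python) =====
-- def remove_extension(filename: str):
--     parts = filename.split('.', 1)
--     return parts[0]
--
-- def parse_track_filename(filename: str):
--     original_base = remove_extension(filename)
--     base = original_base.replace('_', ' ')
--     tokens = base.split()
--
--     def contains_digit(t):
--         return any(ch.isdigit() for ch in t)
--
--     def is_upper_token(t):
--         letters = [c for c in t if c.isalpha()]
--         if not letters:
--             return False
--         return t.isupper()
--
--     state = 'BEFORE_DIGIT'
--     index_tokens = []
--     title_tokens = []
--     artist_tokens = []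
--
--     for t in tokens:
--         if state == 'BEFORE_DIGIT':
--             index_tokens.append(t)
--             if contains_digit(t):
--                 state = 'AFTER_DIGIT_BEFORE_TITLE'
--
--         elif state == 'AFTER_DIGIT_BEFORE_TITLE':
--             if is_upper_token(t):
--                 title_tokens.append(t)
--                 state = 'TITLE'
--             else:
--                 index_tokens.append(t)
--
--         elif state == 'TITLE':
--             if is_upper_token(t):
--                 title_tokens.append(t)
--             else:
--                 artist_tokens.append(t)
--                 state = 'ARTIST'
--
--         else:  # ARTIST
--             artist_tokens.append(t)
--
--     index_str = '_'.join(index_tokens).strip().lower()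
--     title_str = ' '.join(title_tokens).strip().lower()
--     artist_str = ' '.join(artist_tokens).strip().lower()
--
--     return index_str, title_str, artist_str
-- ===== SOURCE B (Python) =====
-- def parse_track_filename(filename: str):
--     tokens = filename.split('.', 1)[0].replace('_', ' ').split()
--     i_end, t_end = _cuts(tokens)
--     return ('_'.join(tokens[:i_end]).strip().lower(),
--             ' '.join(tokens[i_end:t_end]).strip().lower(),
--             ' '.join(tokens[t_end:]).strip().lower())
--
--
-- def _cuts(tokens):
--     # Classify every token once into a 4-symbol class string, then compute the two
--     # cut indices arithmetically with lstrip over character sets.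
--     cls = ''.join(_classify(t) for t in tokens)
--     n = len(cls)
--     s1 = cls.lstrip('Uo')                 # drop tokens before the first digit token
--     if not s1:
--         return n, n                       # no digit token: everything is index
--     s2 = s1[1:].lstrip('do')              # then drop the non-upper tokens (still index)
--     return n - len(s2), n - len(s2.lstrip('UD'))
--
--
-- def _classify(t: str) -> str:
--     has_digit = any(c.isdigit() for c in t)
--     upper = any(c.isalpha() for c in t) and t.isupper()
--     return ('D' if upper else 'd') if has_digit else ('U' if upper else 'o')
-- ===== Notes on version B (the rewrite author's own statement) =====
-- stated objective: alternative
-- what changed: Instead of a state-machine pass accumulating three token lists, B maps every token once to a 4-symbol class character, computes the two cut indices on the resulting class string arithmetically via lstrip with character sets, and slices the token list at those indices.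
import Mathlib
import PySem

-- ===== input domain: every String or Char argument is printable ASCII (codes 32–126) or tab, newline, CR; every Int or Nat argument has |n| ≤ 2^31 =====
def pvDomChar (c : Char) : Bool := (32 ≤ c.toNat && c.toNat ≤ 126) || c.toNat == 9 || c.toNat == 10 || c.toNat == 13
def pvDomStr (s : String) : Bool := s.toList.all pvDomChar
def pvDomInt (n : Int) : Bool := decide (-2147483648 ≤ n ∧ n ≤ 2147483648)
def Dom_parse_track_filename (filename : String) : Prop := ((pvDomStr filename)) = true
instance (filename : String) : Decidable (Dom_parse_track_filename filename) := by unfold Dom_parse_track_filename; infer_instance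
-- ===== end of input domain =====

-- B replaces A's state-machine accumulation of three lists by a per-token classification
-- string whose two cut indices are computed with lstrip, then slices the token list
-- (alternative decomposition, same cost).

-- ===== PORT A =====
-- str.isupper(), exact on the ASCII domain (cased chars = letters): at least one cased char, no lowercase one
def pvStrIsupper (t : List Char) : Bool :=
  t.any (fun c => PySem.Chars.isalpha c) && t.all (fun c => !(PySem.Chars.islower c))

def remove_extension (filename : String) : String :=
  -- split('.', 1) with a nonempty separator is never none and always yields a nonempty list, so the defaults are never hit
  ((PySem.Str.splitMax? filename "." 1).getD []).headD ""

def pvA_containsDigit (t : String) : Bool := t.toList.any PySem.Chars.isdigit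

def pvA_isUpperTok (t : String) : Bool :=
  let letters := t.toList.filter PySem.Chars.isalpha
  if letters.isEmpty then false else pvStrIsupper t.toList

def pvA_step (st : String × List String × List String × List String) (t : String) :
    String × List String × List String × List String :=
  if st.1 = "BEFORE_DIGIT" then
    if pvA_containsDigit t then ("AFTER_DIGIT_BEFORE_TITLE", st.2.1 ++ [t], st.2.2.1, st.2.2.2)
    else ("BEFORE_DIGIT", st.2.1 ++ [t], st.2.2.1, st.2.2.2)
  else if st.1 = "AFTER_DIGIT_BEFORE_TITLE" then
    if pvA_isUpperTok t then ("TITLE", st.2.1, st.2.2.1 ++ [t], st.2.2.2)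
    else (st.1, st.2.1 ++ [t], st.2.2.1, st.2.2.2)
  else if st.1 = "TITLE" then
    if pvA_isUpperTok t then (st.1, st.2.1, st.2.2.1 ++ [t], st.2.2.2)
    else ("ARTIST", st.2.1, st.2.2.1, st.2.2.2 ++ [t])
  else (st.1, st.2.1, st.2.2.1, st.2.2.2 ++ [t])

def parse_track_filename (filename : String) : String × String × String :=
  let original_base := remove_extension filename
  let base := PySem.Str.replace original_base "_" " "
  let tokens := PySem.Str.split₀ base
  let fin := tokens.foldl pvA_step ("BEFORE_DIGIT", [], [], [])
  (PySem.Str.lower (PySem.Str.strip (PySem.Str.join "_" fin.2.1)),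
   PySem.Str.lower (PySem.Str.strip (PySem.Str.join " " fin.2.2.1)),
   PySem.Str.lower (PySem.Str.strip (PySem.Str.join " " fin.2.2.2)))

-- ===== PORT B =====
-- _classify: one class character per token ('D'/'d' has a digit, 'U'/'D' is an upper token)
def pvClassify (t : String) : Char :=
  let has_digit := t.toList.any PySem.Chars.isdigit
  let upper := t.toList.any PySem.Chars.isalpha && pvStrIsupper t.toList
  if has_digit then (if upper then 'D' else 'd') else (if upper then 'U' else 'o')

-- _cuts: cls = ''.join(_classify(t) for t in tokens) kept as its code-point list;
-- str.lstrip(chars) drops exactly the leading chars belonging to the set (exact port)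
def pvCuts (tokens : List String) : Nat × Nat :=
  let cls : List Char := tokens.map pvClassify
  let n := cls.length
  let s1 := cls.dropWhile (fun c => c == 'U' || c == 'o')
  if s1.isEmpty then (n, n)
  else
    let s2 := (s1.drop 1).dropWhile (fun c => c == 'd' || c == 'o')
    (n - s2.length, n - (s2.dropWhile (fun c => c == 'U' || c == 'D')).length)

def parse_track_filename_alt (filename : String) : String × String × String :=
  let tokens := PySem.Str.split₀ (PySem.Str.replace
      (((PySem.Str.splitMax? filename "." 1).getD []).headD "") "_" " ")
  let cuts := pvCuts tokens
  -- tokens[:i], tokens[i:j], tokens[j:] with 0 ≤ i ≤ j ≤ len: take/drop is the exact slice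
  (PySem.Str.lower (PySem.Str.strip (PySem.Str.join "_" (tokens.take cuts.1))),
   PySem.Str.lower (PySem.Str.strip (PySem.Str.join " " ((tokens.drop cuts.1).take (cuts.2 - cuts.1)))),
   PySem.Str.lower (PySem.Str.strip (PySem.Str.join " " (tokens.drop cuts.2))))

-- ===== PRECONDITION & SPEC =====
def Spec_parse_track_filename (filename : String) (out : String × String × String) : Prop := out = parse_track_filename_alt filename
instance (filename : String) (out : String × String × String) : Decidable (Spec_parse_track_filename filename out) := by unfold Spec_parse_track_filename; infer_instance

-- ===== CLAIM (what is proved, stated in full; the proofs are below) =====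
def Claim_equal_parse_track_filename : Prop := ∀ (filename : String), Dom_parse_track_filename filename → Spec_parse_track_filename filename (parse_track_filename filename)

-- ===== LEMMAS AND PROOFS =====
def pvUpp (t : String) : Bool := t.toList.any PySem.Chars.isalpha && pvStrIsupper t.toList

theorem pvA_isUpperTok_eq (t : String) : pvA_isUpperTok t = pvUpp t := by
  unfold pvA_isUpperTok pvUpp
  by_cases h : t.toList.any (fun c => PySem.Chars.isalpha c) = true
  · have hne : (t.toList.filter PySem.Chars.isalpha).isEmpty = false := by
      simp only [List.any_eq_true] at h
      obtain ⟨c, hc, hca⟩ := h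
      simp [List.filter_eq_nil_iff]
      exact ⟨c, hc, hca⟩
    simp [hne, h]
  · have hb : (t.toList.any fun c => PySem.Chars.isalpha c) = false := by simpa using h
    have hne : (t.toList.filter PySem.Chars.isalpha).isEmpty = true := by
      simp only [List.any_eq_true] at h
      simp [List.filter_eq_nil_iff]
      intro c hc
      exact Bool.eq_false_iff.mpr (fun hca => h ⟨c, hc, hca⟩)
    simp [hne, hb]

-- class-character facts: the three lstrip character sets test exactly these token predicates
theorem pvClass_Uo (t : String) :
    ((pvClassify t == 'U' || pvClassify t == 'o') : Bool) = !pvA_containsDigit t := by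
  unfold pvClassify pvA_containsDigit
  cases hd : t.toList.any PySem.Chars.isdigit <;>
    cases hu : (t.toList.any PySem.Chars.isalpha && pvStrIsupper t.toList) <;>
      simp [hd, hu]

theorem pvClass_do (t : String) :
    ((pvClassify t == 'd' || pvClassify t == 'o') : Bool) = !pvUpp t := by
  unfold pvClassify pvUpp
  cases hd : t.toList.any PySem.Chars.isdigit <;>
    cases hu : (t.toList.any PySem.Chars.isalpha && pvStrIsupper t.toList) <;>
      simp [hd, hu]

theorem pvClass_UD (t : String) :
    ((pvClassify t == 'U' || pvClassify t == 'D') : Bool) = pvUpp t := by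
  unfold pvClassify pvUpp
  cases hd : t.toList.any PySem.Chars.isdigit <;>
    cases hu : (t.toList.any PySem.Chars.isalpha && pvStrIsupper t.toList) <;>
      simp [hd, hu]

-- projection of A's fold state onto the three accumulators
def pvProj (st : String × List String × List String × List String) :
    List String × List String × List String := (st.2.1, st.2.2.1, st.2.2.2)

theorem pvFold_artist (ts : List String) (i t a : List String) :
    List.foldl pvA_step ("ARTIST", i, t, a) ts = ("ARTIST", i, t, a ++ ts) := by
  induction ts generalizing a with
  | nil => simp
  | cons u rest ih => simp [pvA_step, ih]

theorem pvFold_title (ts : List String) (i t a : List String) :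
    pvProj (List.foldl pvA_step ("TITLE", i, t, a) ts) =
      (i, t ++ ts.takeWhile pvUpp, a ++ ts.dropWhile pvUpp) := by
  induction ts generalizing t a with
  | nil => simp [pvProj]
  | cons u rest ih =>
    by_cases hu : pvUpp u = true
    · simp [pvA_step, pvA_isUpperTok_eq, hu, ih]
    · simp [pvA_step, pvA_isUpperTok_eq, hu, pvFold_artist, pvProj]

theorem pvFold_after (ts : List String) (i t a : List String) :
    pvProj (List.foldl pvA_step ("AFTER_DIGIT_BEFORE_TITLE", i, t, a) ts) =
      (i ++ ts.takeWhile (fun u => !pvUpp u),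
       t ++ (ts.dropWhile (fun u => !pvUpp u)).takeWhile pvUpp,
       a ++ (ts.dropWhile (fun u => !pvUpp u)).dropWhile pvUpp) := by
  induction ts generalizing i with
  | nil => simp [pvProj]
  | cons u rest ih =>
    by_cases hu : pvUpp u = true
    · simp [pvA_step, pvA_isUpperTok_eq, hu, pvFold_title]
    · simp [pvA_step, pvA_isUpperTok_eq, hu, ih]

theorem pvFold_before (ts : List String) (i t a : List String) :
    pvProj (List.foldl pvA_step ("BEFORE_DIGIT", i, t, a) ts) =
      match ts.dropWhile (fun u => !pvA_containsDigit u) with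
      | [] => (i ++ ts, t, a)
      | d :: rest =>
          (i ++ ts.takeWhile (fun u => !pvA_containsDigit u) ++ d ::
             rest.takeWhile (fun u => !pvUpp u),
           t ++ ((rest.dropWhile (fun u => !pvUpp u)).takeWhile pvUpp),
           a ++ ((rest.dropWhile (fun u => !pvUpp u)).dropWhile pvUpp)) := by
  induction ts generalizing i with
  | nil => simp [pvProj]
  | cons u rest ih =>
    by_cases hd : pvA_containsDigit u = true
    · have hstep : pvA_step ("BEFORE_DIGIT", i, t, a) u
          = ("AFTER_DIGIT_BEFORE_TITLE", i ++ [u], t, a) := by simp [pvA_step, hd]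
      rw [List.foldl_cons, hstep, pvFold_after]
      simp [hd]
    · have hstep : pvA_step ("BEFORE_DIGIT", i, t, a) u
          = ("BEFORE_DIGIT", i ++ [u], t, a) := by simp [pvA_step, hd]
      rw [List.foldl_cons, hstep, ih (i ++ [u])]
      have hdb : pvA_containsDigit u = false := by simpa using hd
      have hdw : List.dropWhile (fun u => !pvA_containsDigit u) (u :: rest)
          = List.dropWhile (fun u => !pvA_containsDigit u) rest := by simp [hdb]
      have htw : List.takeWhile (fun u => !pvA_containsDigit u) (u :: rest)
          = u :: List.takeWhile (fun u => !pvA_containsDigit u) rest := by simp [hdb]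
      rw [hdw, htw]
      cases hrest : List.dropWhile (fun u => !pvA_containsDigit u) rest <;> simp

-- pvCuts, moved back from class characters to token predicates
theorem pvCuts_eq (ts : List String) :
    pvCuts ts =
      match ts.dropWhile (fun u => !pvA_containsDigit u) with
      | [] => (ts.length, ts.length)
      | _ :: rest =>
          (ts.length - (rest.dropWhile (fun u => !pvUpp u)).length,
           ts.length - ((rest.dropWhile (fun u => !pvUpp u)).dropWhile pvUpp).length) := by
  unfold pvCuts
  have h1 : (ts.map pvClassify).dropWhile (fun c => c == 'U' || c == 'o')
      = (ts.dropWhile (fun u => !pvA_containsDigit u)).map pvClassify := by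
    have hp : ((fun c => c == 'U' || c == 'o') ∘ pvClassify)
        = (fun u : String => !pvA_containsDigit u) := by
      funext u; simpa [Function.comp] using pvClass_Uo u
    rw [List.dropWhile_map, hp]
  simp only [h1, List.length_map]
  cases hcase : ts.dropWhile (fun u => !pvA_containsDigit u) with
  | nil => simp
  | cons d rest =>
    have h2 : (rest.map pvClassify).dropWhile (fun c => c == 'd' || c == 'o')
        = (rest.dropWhile (fun u => !pvUpp u)).map pvClassify := by
      have hp : ((fun c => c == 'd' || c == 'o') ∘ pvClassify)
          = (fun u : String => !pvUpp u) := by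
        funext u; simpa [Function.comp] using pvClass_do u
      rw [List.dropWhile_map, hp]
    have h3 : ((rest.dropWhile (fun u => !pvUpp u)).map pvClassify).dropWhile
          (fun c => c == 'U' || c == 'D')
        = ((rest.dropWhile (fun u => !pvUpp u)).dropWhile pvUpp).map pvClassify := by
      have hp : ((fun c => c == 'U' || c == 'D') ∘ pvClassify) = pvUpp := by
        funext u; simpa [Function.comp] using pvClass_UD u
      rw [List.dropWhile_map, hp]
    simp [h2, h3]

-- the heart: A's fold result equals B's cut-and-slice result
theorem pvMain (ts : List String) :
    pvProj (ts.foldl pvA_step ("BEFORE_DIGIT", [], [], [])) =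
      (ts.take (pvCuts ts).1,
       (ts.drop (pvCuts ts).1).take ((pvCuts ts).2 - (pvCuts ts).1),
       ts.drop (pvCuts ts).2) := by
  rw [pvFold_before, pvCuts_eq]
  cases hcase : ts.dropWhile (fun u => !pvA_containsDigit u) with
  | nil => simp
  | cons d rest =>
    have hts : ts = ts.takeWhile (fun u => !pvA_containsDigit u) ++ d :: rest := by
      conv_lhs => rw [← List.takeWhile_append_dropWhile
        (p := fun u => !pvA_containsDigit u) (l := ts)]
      rw [hcase]
    have hrest : rest = rest.takeWhile (fun u => !pvUpp u)
        ++ rest.dropWhile (fun u => !pvUpp u) :=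
      (List.takeWhile_append_dropWhile).symm
    have hrest2 : rest.dropWhile (fun u => !pvUpp u)
        = (rest.dropWhile (fun u => !pvUpp u)).takeWhile pvUpp
          ++ (rest.dropWhile (fun u => !pvUpp u)).dropWhile pvUpp :=
      (List.takeWhile_append_dropWhile).symm
    -- ts split at the first cut
    have hL1 : ts = (ts.takeWhile (fun u => !pvA_containsDigit u) ++ d ::
        rest.takeWhile (fun u => !pvUpp u)) ++ rest.dropWhile (fun u => !pvUpp u) := by
      conv_lhs => rw [hts]
      conv_lhs => rw [hrest]
      simp
    have hlen1 : (ts.takeWhile (fun u => !pvA_containsDigit u) ++ d ::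
        rest.takeWhile (fun u => !pvUpp u)).length
        = ts.length - (rest.dropWhile (fun u => !pvUpp u)).length := by
      have := congrArg List.length hL1
      simp only [List.length_append, List.length_cons] at this ⊢
      omega
    have h1 : ts.take (ts.length - (rest.dropWhile (fun u => !pvUpp u)).length)
        = ts.takeWhile (fun u => !pvA_containsDigit u) ++ d ::
          rest.takeWhile (fun u => !pvUpp u) := by
      nth_rewrite 2 [hL1]
      exact List.take_left' hlen1
    have h2 : ts.drop (ts.length - (rest.dropWhile (fun u => !pvUpp u)).length)
        = rest.dropWhile (fun u => !pvUpp u) := by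
      nth_rewrite 2 [hL1]
      exact List.drop_left' hlen1
    -- ts split at the second cut
    have hL2 : ts = ((ts.takeWhile (fun u => !pvA_containsDigit u) ++ d ::
        rest.takeWhile (fun u => !pvUpp u))
          ++ (rest.dropWhile (fun u => !pvUpp u)).takeWhile pvUpp)
        ++ (rest.dropWhile (fun u => !pvUpp u)).dropWhile pvUpp := by
      conv_lhs => rw [hL1]
      conv_lhs => rw [hrest2]
      simp
    have hlen2 : ((ts.takeWhile (fun u => !pvA_containsDigit u) ++ d ::
        rest.takeWhile (fun u => !pvUpp u))
          ++ (rest.dropWhile (fun u => !pvUpp u)).takeWhile pvUpp).length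
        = ts.length - ((rest.dropWhile (fun u => !pvUpp u)).dropWhile pvUpp).length := by
      have := congrArg List.length hL2
      simp only [List.length_append, List.length_cons] at this ⊢
      omega
    have h3 : ts.drop (ts.length - ((rest.dropWhile (fun u => !pvUpp u)).dropWhile pvUpp).length)
        = (rest.dropWhile (fun u => !pvUpp u)).dropWhile pvUpp := by
      nth_rewrite 2 [hL2]
      exact List.drop_left' hlen2
    -- the middle slice
    have hmid : (ts.length - ((rest.dropWhile (fun u => !pvUpp u)).dropWhile pvUpp).length)
        - (ts.length - (rest.dropWhile (fun u => !pvUpp u)).length)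
        = ((rest.dropWhile (fun u => !pvUpp u)).takeWhile pvUpp).length := by
      have hl1 := congrArg List.length hL1
      have hl2 := congrArg List.length hrest2
      simp only [List.length_append, List.length_cons] at hl1 hl2
      omega
    have h4 : ((rest.dropWhile (fun u => !pvUpp u)).takeWhile pvUpp
          ++ (rest.dropWhile (fun u => !pvUpp u)).dropWhile pvUpp).take
          (((rest.dropWhile (fun u => !pvUpp u)).takeWhile pvUpp).length)
        = (rest.dropWhile (fun u => !pvUpp u)).takeWhile pvUpp :=
      List.take_left' rfl
    rw [← hrest2] at h4
    simp only [h1, h2, hmid, h3]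
    simp [h4]

-- ===== VERDICT (by name: the statement is the Claim_ definition above) =====
theorem parse_track_filename_spec : Claim_equal_parse_track_filename := by
  intro filename _
  unfold Spec_parse_track_filename parse_track_filename parse_track_filename_alt remove_extension
  have h := pvMain (PySem.Str.split₀ (PySem.Str.replace
      (((PySem.Str.splitMax? filename "." 1).getD []).headD "") "_" " "))
  have h1 := congrArg (fun p => p.1) h
  have h2 := congrArg (fun p => p.2.1) h
  have h3 := congrArg (fun p => p.2.2) h
  simp only [pvProj] at h1 h2 h3
  simp only []
  rw [h1, h2, h3]
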